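-- pv_equiv track=rewrite | github.com/Prabhnometery/ITI1120 | a3_300057572/a3_part1_300057572.py | zero_out
-- ===== SOURCE A (Python) =====
-- def zero_out(a1,a2):
--     '''
--     (list, list) -> list
--     If a2 is a subset of a1, a1 is returned with the subset elements
--     replaced by 0s.
--     Precondition: a2 must be smaller than a1; a1 and a2 have a length
--
--     '''
--
--     if len(a1) < len(a2):
--             return None
--
--     # check the start of possible combination in
--     # list a1
--     i = 0
--     while i < (len(a1) - len(a2) + 1):
--
--             sublist = a1[i:(i + len(a2))]
--             if sublist == a2:
--                     for x in range(len(a2)):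
--                             a1[i+x] = 0
--                     i += len(a2)
--             else:
--                     i += 1
--     return a1
-- ===== SOURCE B (Python) =====
-- def zero_out(a1, a2):
--     # Rolling-sum (Rabin-Karp style) scan: the O(m) window comparison runs only
--     # when the window's sum equals the pattern's sum; builds a fresh output list
--     # (does not mutate a1).
--     m = len(a2)
--     n = len(a1)
--     if n < m:
--         return None
--     target = sum(a2)
--     s = sum(a1[:m])
--     out = []
--     i = 0
--     while i <= n - m:
--         if s == target and a1[i:i + m] == a2:
--             out.extend([0] * m)
--             i += m
--             if i <= n - m:
--                 s = sum(a1[i:i + m])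
--         else:
--             out.append(a1[i])
--             if i + m < n:
--                 s = s - a1[i] + a1[i + m]
--             i += 1
--     out.extend(a1[i:])
--     return out
-- ===== Notes on version B (the rewrite author's own statement) =====
-- stated objective: alternative
-- what changed: Replaces A's slice-and-compare at every position (with in-place zeroing of a1) by a Rabin-Karp-style rolling-sum scan that attempts the full window comparison only when the window's sum equals the pattern's sum, building a fresh output list; Pre_ excludes a2 = [], on which A's while loop never terminates (i += 0 forever).
import Mathlib
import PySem

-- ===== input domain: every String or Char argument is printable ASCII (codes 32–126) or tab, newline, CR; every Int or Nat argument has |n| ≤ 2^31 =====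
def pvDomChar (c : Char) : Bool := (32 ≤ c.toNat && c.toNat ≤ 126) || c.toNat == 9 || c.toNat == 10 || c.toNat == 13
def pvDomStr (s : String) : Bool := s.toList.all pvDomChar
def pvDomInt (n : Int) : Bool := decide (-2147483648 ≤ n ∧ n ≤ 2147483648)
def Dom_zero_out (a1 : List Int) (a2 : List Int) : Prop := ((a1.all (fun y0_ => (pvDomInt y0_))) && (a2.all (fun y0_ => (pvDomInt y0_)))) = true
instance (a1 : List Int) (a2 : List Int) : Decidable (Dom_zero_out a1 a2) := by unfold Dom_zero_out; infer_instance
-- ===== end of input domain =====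

-- B replaces A's in-place sliding scan by a rolling-sum (Rabin-Karp style) pass that runs the
-- full window comparison only when the window's sum equals the pattern's sum; A mutates a1 in
-- place and returns it, B builds a fresh list — the equivalence proved is about the RETURN value.


-- ===== PORT A =====
-- A's while loop: state (i, arr); per iteration, if a1[i:i+len(a2)] == a2 zero that window
-- (for x in range(len(a2)): a1[i+x] = 0; indices always in range there) and jump i by len(a2),
-- else i += 1.  Fuel n+1 bounds the iteration count when a2 ≠ []; on a2 = [] the Python loop
-- never terminates, which Pre_ excludes.
def zoLoopA (a2 : List Int) : Nat → Nat → List Int → List Int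
  | 0, _, arr => arr
  | fuel + 1, i, arr =>
    if i < arr.length - a2.length + 1 then
      if PySem.List.slice arr (some (i : Int)) (some ((i : Int) + (a2.length : Int))) = a2 then
        zoLoopA a2 fuel (i + a2.length) ((List.range a2.length).foldl (fun acc x => acc.set (i + x) 0) arr)
      else
        zoLoopA a2 fuel (i + 1) arr
    else arr

def zero_out (a1 : List Int) (a2 : List Int) : Option (List Int) :=
  if a1.length < a2.length then none
  else some (zoLoopA a2 (a1.length + 1) 0 a1)

-- ===== PORT B =====
-- B's while loop: state (i, s, out) where s is the rolling sum of the window a1[i:i+m]; the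
-- window comparison runs only when s = target.  a1[i] and a1[i+m] are read only in range,
-- ported with pyGetD (exact there).  Fuel n+1 bounds the iterations when a2 ≠ [] (Pre_).
def rkLoopB (a1 a2 : List Int) (target : Int) : Nat → Nat → Int → List Int → List Int
  | 0, i, _, out => out ++ a1.drop i
  | fuel + 1, i, s, out =>
    if i ≤ a1.length - a2.length then
      if s = target ∧ PySem.List.slice a1 (some (i : Int)) (some ((i : Int) + (a2.length : Int))) = a2 then
        rkLoopB a1 a2 target fuel (i + a2.length)
          (if i + a2.length ≤ a1.length - a2.length then
              (PySem.List.slice a1 (some ((i + a2.length : Nat) : Int)) (some (((i + a2.length : Nat) : Int) + (a2.length : Int)))).sum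
            else s)
          (out ++ List.replicate a2.length 0)
      else
        rkLoopB a1 a2 target fuel (i + 1)
          (if i + a2.length < a1.length then
              s - PySem.List.pyGetD a1 (i : Int) 0 + PySem.List.pyGetD a1 ((i : Int) + (a2.length : Int)) 0
            else s)
          (out ++ [PySem.List.pyGetD a1 (i : Int) 0])
    else out ++ a1.drop i        -- out.extend(a1[i:]) after the while loop

def zero_out_alt (a1 : List Int) (a2 : List Int) : Option (List Int) :=
  if a1.length < a2.length then none
  else some (rkLoopB a1 a2 a2.sum (a1.length + 1) 0 (a1.take a2.length).sum [])

-- ===== PRECONDITION & SPEC =====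
-- Pre_ excludes a2 = [], on which Python A never returns (its while loop advances i by 0 forever).
def Pre_zero_out (a1 : List Int) (a2 : List Int) : Prop := a2 ≠ []
instance (a1 : List Int) (a2 : List Int) : Decidable (Pre_zero_out a1 a2) := by unfold Pre_zero_out; infer_instance
def pvWitness_zero_out : List Int × List Int := ([1, 2, 3, 2, 3], [2, 3])

def Spec_zero_out (a1 : List Int) (a2 : List Int) (out : Option (List Int)) : Prop := out = zero_out_alt a1 a2
instance (a1 : List Int) (a2 : List Int) (out : Option (List Int)) : Decidable (Spec_zero_out a1 a2 out) := by unfold Spec_zero_out; infer_instance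

-- ===== CLAIM (what is proved, stated in full; the proofs are below) =====
def Claim_equal_zero_out : Prop := ∀ (a1 : List Int) (a2 : List Int), Dom_zero_out a1 a2 → Pre_zero_out a1 a2 → Spec_zero_out a1 a2 (zero_out a1 a2)

-- ===== LEMMAS AND PROOFS =====

-- Reference function: greedy left-to-right non-overlapping replacement of occurrences of p by 0s.
def gspec (p : List Int) : List Int → List Int
  | [] => []
  | x :: xs =>
    if p <+: (x :: xs) then List.replicate p.length 0 ++ gspec p (xs.drop (p.length - 1))
    else x :: gspec p xs
termination_by t => t.length
decreasing_by
  all_goals simp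

theorem gspec_short (p : List Int) : ∀ (t : List Int), t.length < p.length → gspec p t = t
  | [], _ => by rw [gspec]
  | x :: xs, h => by
    rw [gspec]
    have hnp : ¬ p <+: (x :: xs) := fun hp => absurd hp.length_le (by omega)
    rw [if_neg hnp, gspec_short p xs (by simp at h ⊢; omega)]

theorem gspec_pos (p t : List Int) (hm : 0 < p.length) (hlen : p.length ≤ t.length)
    (hpre : t.take p.length = p) :
    gspec p t = List.replicate p.length 0 ++ gspec p (t.drop p.length) := by
  match t with
  | [] => simp only [List.length_nil] at hlen; omega
  | x :: xs =>
    rw [gspec, if_pos (List.prefix_iff_eq_take.mpr hpre.symm)]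
    congr 1
    have h1 : (x :: xs).drop p.length = xs.drop (p.length - 1) := by
      rw [show p.length = (p.length - 1) + 1 by omega]
      rfl
    rw [h1]

theorem set_append_len (l1 l2 : List Int) (k : Nat) (v : Int) (h : k = l1.length) :
    (l1 ++ l2).set k v = l1 ++ l2.set 0 v := by
  subst h
  induction l1 with
  | nil => simp
  | cons a t ih => simp [ih]

theorem setZeros_eq (arr : List Int) (i m : Nat) (h : i + m ≤ arr.length) :
    (List.range m).foldl (fun acc x => acc.set (i + x) 0) arr
      = arr.take i ++ (List.replicate m 0 ++ arr.drop (i + m)) := by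
  induction m with
  | zero => simp
  | succ m ih =>
    rw [List.range_succ, List.foldl_append, ih (by omega)]
    simp only [List.foldl_cons, List.foldl_nil]
    have hlen : i + m = (arr.take i ++ List.replicate m (0 : Int)).length := by
      simp [List.length_take]; omega
    rw [← List.append_assoc, set_append_len _ _ _ _ hlen, List.append_assoc]
    have hd : arr.drop (i + m) = arr[i + m] :: arr.drop (i + m + 1) :=
      List.drop_eq_getElem_cons (by omega)
    rw [hd]
    simp only [List.set_cons_zero, List.replicate_succ', List.append_assoc, List.singleton_append]
    rw [show i + (m + 1) = i + m + 1 by omega]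

theorem zoLoopA_eq : ∀ (fuel : Nat) (p arr : List Int) (i : Nat), p ≠ [] → p.length ≤ arr.length →
    arr.length + 1 ≤ fuel + i → i ≤ arr.length →
    zoLoopA p fuel i arr = arr.take i ++ gspec p (arr.drop i) := by
  intro fuel
  induction fuel with
  | zero => intro p arr i hp hmn hf hi; omega
  | succ fuel ih =>
    intro p arr i hp hmn hf hi
    have hm1 : 0 < p.length := List.length_pos_of_ne_nil hp
    rw [zoLoopA]
    by_cases hcond : i < arr.length - p.length + 1
    · rw [if_pos hcond]
      have him : i + p.length ≤ arr.length := by omega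
      rw [PySem.List.slice_natCast_add]
      by_cases hmatch : (arr.drop i).take p.length = p
      · rw [if_pos hmatch]
        rw [ih p _ (i + p.length) hp ?_ ?_ ?_]
        · rw [setZeros_eq arr i p.length him]
          have ht : ((arr.take i ++ (List.replicate p.length 0 ++ arr.drop (i + p.length)))).take (i + p.length)
              = arr.take i ++ List.replicate p.length 0 := by
            rw [← List.append_assoc]
            apply List.take_left'
            simp [List.length_take]; omega
          have hdd : ((arr.take i ++ (List.replicate p.length 0 ++ arr.drop (i + p.length)))).drop (i + p.length)
              = arr.drop (i + p.length) := by
            rw [← List.append_assoc]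
            apply List.drop_left'
            simp [List.length_take]; omega
          rw [ht, hdd]
          rw [gspec_pos p (arr.drop i) hm1 (by simp; omega) hmatch]
          rw [List.drop_drop]
          simp only [List.append_assoc]
        · rw [setZeros_eq arr i p.length him]
          simp [List.length_take]; omega
        · rw [setZeros_eq arr i p.length him]
          simp [List.length_take]; omega
        · rw [setZeros_eq arr i p.length him]
          simp [List.length_take]; omega
      · rw [if_neg hmatch]
        rw [ih p arr (i + 1) hp hmn (by omega) (by omega)]
        have hip : i < arr.length := by omega
        have hnp : ¬ p <+: arr.drop i := by
          intro hpre
          exact hmatch ((List.prefix_iff_eq_take.mp hpre).symm)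
        have hd : arr.drop i = arr[i] :: arr.drop (i + 1) := List.drop_eq_getElem_cons hip
        rw [hd] at hnp
        conv_rhs => rw [hd]
        rw [gspec, if_neg hnp]
        have htake : List.take (i + 1) arr = List.take i arr ++ [arr[i]] := by
          rw [List.take_add_one, List.getElem?_eq_getElem hip]
          rfl
        rw [htake, List.append_assoc, List.singleton_append]
    · rw [if_neg hcond]
      have hshort : (arr.drop i).length < p.length := by simp; omega
      rw [gspec_short p _ hshort, List.take_append_drop]

theorem window_roll (a1 : List Int) (i m : Nat) (hm : 0 < m) (h : i + m < a1.length) :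
    ((a1.drop (i + 1)).take m).sum = ((a1.drop i).take m).sum - a1[i] + a1[i + m] := by
  obtain ⟨k, rfl⟩ : ∃ k, m = k + 1 := ⟨m - 1, by omega⟩
  have h1 : (a1.drop i).take (k + 1) = a1[i] :: (a1.drop (i + 1)).take k := by
    rw [List.drop_eq_getElem_cons (show i < a1.length by omega), List.take_succ_cons]
  have h2 : (a1.drop (i + 1)).take (k + 1) = (a1.drop (i + 1)).take k ++ [a1[i + (k + 1)]] := by
    rw [List.take_add_one]
    congr 1
    rw [List.getElem?_drop, show i + 1 + k = i + (k + 1) by omega, List.getElem?_eq_getElem h]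
    rfl
  rw [h1, h2]
  simp

theorem rkLoopB_eq : ∀ (fuel : Nat) (a1 p : List Int) (i : Nat) (s : Int) (out : List Int),
    p ≠ [] → p.length ≤ a1.length → a1.length + 1 ≤ fuel + i → i ≤ a1.length →
    (i ≤ a1.length - p.length → s = ((a1.drop i).take p.length).sum) →
    rkLoopB a1 p p.sum fuel i s out = out ++ gspec p (a1.drop i) := by
  intro fuel
  induction fuel with
  | zero => intro a1 p i s out hp hmn hf hi hs; omega
  | succ fuel ih =>
    intro a1 p i s out hp hmn hf hi hs
    have hm1 : 0 < p.length := List.length_pos_of_ne_nil hp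
    rw [rkLoopB]
    by_cases hcond : i ≤ a1.length - p.length
    · rw [if_pos hcond]
      have him : i + p.length ≤ a1.length := by omega
      have hsv := hs hcond
      rw [PySem.List.slice_natCast_add, PySem.List.slice_natCast_add]
      by_cases hmatch : (a1.drop i).take p.length = p
      · have hseq : s = p.sum := by rw [hsv, hmatch]
        rw [if_pos ⟨hseq, hmatch⟩]
        rw [ih a1 p (i + p.length) _ _ hp hmn (by omega) (by omega) ?_]
        · rw [gspec_pos p (a1.drop i) hm1 (by simp; omega) hmatch]
          rw [List.drop_drop]
          simp only [List.append_assoc]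
        · intro h'
          rw [if_pos h']
      · rw [if_neg (fun hc => hmatch hc.2)]
        have hip : i < a1.length := by omega
        have hgi : PySem.List.pyGetD a1 (i : Int) 0 = a1[i] := by
          rw [PySem.List.pyGetD_natCast]
          exact List.getD_eq_getElem a1 0 hip
        rw [ih a1 p (i + 1) _ _ hp hmn (by omega) (by omega) ?_]
        · have hnp : ¬ p <+: a1.drop i := fun hpre => hmatch ((List.prefix_iff_eq_take.mp hpre).symm)
          have hd : a1.drop i = a1[i] :: a1.drop (i + 1) := List.drop_eq_getElem_cons hip
          rw [hd] at hnp
          conv_rhs => rw [hd]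
          rw [gspec, if_neg hnp, hgi]
          simp
        · intro h'
          have hlt : i + p.length < a1.length := by omega
          rw [if_pos hlt, hgi]
          have hgm : PySem.List.pyGetD a1 ((i : Int) + (p.length : Int)) 0 = a1[i + p.length] := by
            rw [show ((i : Int) + (p.length : Int)) = ((i + p.length : Nat) : Int) by push_cast; ring]
            rw [PySem.List.pyGetD_natCast]
            exact List.getD_eq_getElem a1 0 hlt
          rw [hgm, window_roll a1 i p.length hm1 hlt, hsv]
    · rw [if_neg hcond]
      have hshort : (a1.drop i).length < p.length := by simp; omega
      rw [gspec_short p _ hshort]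

-- ===== VERDICT (by name: the statement is the Claim_ definition above) =====
theorem zero_out_spec : Claim_equal_zero_out := by
  intro a1 a2 _ hpre
  unfold Spec_zero_out zero_out zero_out_alt
  by_cases h : a1.length < a2.length
  · rw [if_pos h, if_pos h]
  · rw [if_neg h, if_neg h]
    have hmn : a2.length ≤ a1.length := by omega
    rw [zoLoopA_eq (a1.length + 1) a2 a1 0 hpre hmn (by omega) (by omega)]
    rw [rkLoopB_eq (a1.length + 1) a1 a2 0 _ [] hpre hmn (by omega) (by omega) (by intro _; simp)]
    simp
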